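-- pv_equiv track=rewrite | github.com/suleman7-DMD/dental-pe-tracker | scrapers/dedup_practice_locations.py | _is_non_clinical_name
-- ===== SOURCE A (Python) =====
-- _NON_CLINICAL_KEYWORDS = [
--     "LABORATORY", "DENTAL LAB", " LAB ", "SUPPLY", "BILLING",
--     "STAFFING", "MANAGEMENT GROUP", "MANAGEMENT COMPANY",
--     "MANAGEMENT SERVICES", "INSURANCE", "DENTURE CLINIC",
-- ]
--
-- _NON_CLINICAL_HARD = ["LABORATORY", " LAB ", "SUPPLY", "BILLING", "STAFFING"]
--
-- def _is_non_clinical_name(name: str) -> bool: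
--     """Return True if practice name indicates non-clinical entity."""
--     if not name:
--         return False
--     n = name.upper()
--     # Hard non-clinical keywords always match
--     for kw in _NON_CLINICAL_HARD:
--         if kw in n:
--             # Exception: skip if name also contains dental keywords
--             if not any(dk in n for dk in ["DENTAL", "ORTHODONT", "IMPLANT"]):
--                 return True
--     # Ambiguous keywords only match if no dental keywords present
--     for kw in _NON_CLINICAL_KEYWORDS:
--         if kw in n and not any(dk in n for dk in ["DENTAL", "ORTHODONT", "IMPLANT"]):
--             return True
--     return False
-- ===== SOURCE B (Python) =====
-- _NON_CLINICAL_KEYWORDS = [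
--     "LABORATORY", "DENTAL LAB", " LAB ", "SUPPLY", "BILLING",
--     "STAFFING", "MANAGEMENT GROUP", "MANAGEMENT COMPANY",
--     "MANAGEMENT SERVICES", "INSURANCE", "DENTURE CLINIC",
-- ]
--
-- _DENTAL_KEYWORDS = ("DENTAL", "ORTHODONT", "IMPLANT")
--
--
-- def _is_non_clinical_name(name: str) -> bool:
--     """Return True if practice name indicates non-clinical entity.
--
--     Single left-to-right sweep over the positions of the uppercased name,
--     matching all patterns at each position (multi-pattern scan) instead of
--     one full substring search per keyword: a dental keyword anywhere vetoes
--     everything, so return False the moment one starts at the current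
--     position; otherwise remember whether a non-clinical keyword started here.
--     """
--     if not name:
--         return False
--     n = name.upper()
--     found = False
--     for i in range(len(n)):
--         if n.startswith(_DENTAL_KEYWORDS, i):
--             return False
--         if not found and n.startswith(tuple(_NON_CLINICAL_KEYWORDS), i):
--             found = True
--     return found
-- ===== Notes on version B (the rewrite author's own statement) =====
-- stated objective: alternative
-- what changed: B replaces A's per-keyword substring searches ('kw in n' for each keyword, with the dental check recomputed inside each loop) by a single left-to-right multi-pattern sweep over the positions of the uppercased name: at each position it tries to match all patterns via startswith, returns False immediately when a dental keyword starts there (a dental keyword anywhere vetoes every match), and otherwise accumulates a found flag for the non-clinical keywords.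
import Mathlib
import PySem

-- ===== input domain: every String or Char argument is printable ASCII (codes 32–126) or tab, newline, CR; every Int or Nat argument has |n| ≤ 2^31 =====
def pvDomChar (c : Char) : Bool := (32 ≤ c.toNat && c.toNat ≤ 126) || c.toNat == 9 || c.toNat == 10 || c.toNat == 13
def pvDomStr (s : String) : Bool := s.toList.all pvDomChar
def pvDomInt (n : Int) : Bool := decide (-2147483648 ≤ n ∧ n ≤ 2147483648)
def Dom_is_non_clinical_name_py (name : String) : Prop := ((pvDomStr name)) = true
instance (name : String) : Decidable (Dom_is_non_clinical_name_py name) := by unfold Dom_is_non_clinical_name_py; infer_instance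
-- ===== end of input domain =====

-- B replaces A's per-keyword substring searches by one left-to-right multi-pattern sweep
-- over the positions of the uppercased name (objective: alternative).

-- module constant _NON_CLINICAL_KEYWORDS
def pvNonClinicalKeywords : List String :=
  ["LABORATORY", "DENTAL LAB", " LAB ", "SUPPLY", "BILLING",
   "STAFFING", "MANAGEMENT GROUP", "MANAGEMENT COMPANY",
   "MANAGEMENT SERVICES", "INSURANCE", "DENTURE CLINIC"]

-- module constant _NON_CLINICAL_HARD
def pvNonClinicalHard : List String :=
  ["LABORATORY", " LAB ", "SUPPLY", "BILLING", "STAFFING"]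

def pvDentalKeywords : List String := ["DENTAL", "ORTHODONT", "IMPLANT"]

-- ===== PORT A =====
-- 'for kw in L: if <cond kw>: return True' over a literal list is L.any; the inner
-- 'any(dk in n for dk in [...])' is recomputed per keyword, exactly as in A.
def is_non_clinical_name_py (name : String) : Bool :=
  if name.toList.isEmpty then false
  else
    let n := PySem.Str.upper name
    if pvNonClinicalHard.any (fun kw =>
        PySem.Str.isIn kw n &&
        !(pvDentalKeywords.any (fun dk => PySem.Str.isIn dk n))) then true
    else if pvNonClinicalKeywords.any (fun kw =>
        PySem.Str.isIn kw n &&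
        !(pvDentalKeywords.any (fun dk => PySem.Str.isIn dk n))) then true
    else false

-- ===== PORT B =====
-- B's 'for i in range(len(n))' with 'n.startswith(kws, i)' is the structural recursion
-- over the successive suffixes n[i:]; 'startswith(kw, i)' is exactly 'kw prefix of the
-- suffix at i' (the match must fit inside the string, as List.isPrefixOf requires).
def pvSweep (l : List Char) (found : Bool) : Bool :=
  match l with
  | [] => found
  | _ :: rest =>
    if pvDentalKeywords.any (fun dk => dk.toList.isPrefixOf l) then false
    else pvSweep rest
      (found || (!found && pvNonClinicalKeywords.any (fun kw => kw.toList.isPrefixOf l)))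

def is_non_clinical_name_py_alt (name : String) : Bool :=
  if name.toList.isEmpty then false
  else pvSweep (PySem.Str.upper name).toList false

-- ===== PRECONDITION & SPEC =====
def Spec_is_non_clinical_name_py (name : String) (out : Bool) : Prop := out = is_non_clinical_name_py_alt name
instance (name : String) (out : Bool) : Decidable (Spec_is_non_clinical_name_py name out) := by unfold Spec_is_non_clinical_name_py; infer_instance

-- ===== CLAIM (what is proved, stated in full; the proofs are below) =====
def Claim_equal_is_non_clinical_name_py : Prop := ∀ (name : String), Dom_is_non_clinical_name_py name → Spec_is_non_clinical_name_py name (is_non_clinical_name_py name)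

-- ===== LEMMAS AND PROOFS =====

-- 'some keyword of kws starts at some position of l' (the sweep's match notion)
def pvHits (kws : List String) : List Char → Bool
  | [] => false
  | l@(_ :: rest) => kws.any (fun kw => kw.toList.isPrefixOf l) || pvHits kws rest

-- the sweep computes: no dental hit anywhere, and (found already, or a keyword hit)
theorem pvSweep_eq (l : List Char) (found : Bool) :
    pvSweep l found =
      (!(pvHits pvDentalKeywords l) && (found || pvHits pvNonClinicalKeywords l)) := by
  induction l generalizing found with
  | nil => simp [pvSweep, pvHits]
  | cons c rest ih =>
    rw [pvSweep]
    by_cases hd : pvDentalKeywords.any (fun dk => dk.toList.isPrefixOf (c :: rest)) = true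
    · simp [hd, pvHits]
    · rw [if_neg hd, ih]
      simp only [Bool.not_eq_true] at hd
      cases found <;> simp [pvHits, hd]

-- a position-wise hit of a nonempty pattern is exactly an infix occurrence
theorem pvHits_iff (kws : List String) (hne : ∀ kw ∈ kws, kw.toList ≠ []) (l : List Char) :
    pvHits kws l = true ↔ ∃ kw ∈ kws, kw.toList <:+: l := by
  induction l with
  | nil =>
    simp only [pvHits, Bool.false_eq_true, false_iff]
    rintro ⟨kw, hmem, hinf⟩
    exact hne kw hmem (List.eq_nil_of_infix_nil hinf)
  | cons c rest ih =>
    simp only [pvHits, Bool.or_eq_true, List.any_eq_true, ih]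
    constructor
    · rintro (⟨kw, hmem, hp⟩ | ⟨kw, hmem, hinf⟩)
      · exact ⟨kw, hmem, (List.isPrefixOf_iff_prefix.mp hp).isInfix⟩
      · exact ⟨kw, hmem, hinf.trans (List.infix_cons (List.infix_refl rest))⟩
    · rintro ⟨kw, hmem, hinf⟩
      rcases (List.infix_cons_iff).mp hinf with hp | hinf'
      · exact Or.inl ⟨kw, hmem, List.isPrefixOf_iff_prefix.mpr hp⟩
      · exact Or.inr ⟨kw, hmem, hinf'⟩

-- hence the sweep's hit test agrees with Python's 'kw in n' scan over the keyword list
theorem pvHits_eq_any_isIn (kws : List String) (hne : ∀ kw ∈ kws, kw.toList ≠ [])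
    (n : String) : pvHits kws n.toList = kws.any (fun kw => PySem.Str.isIn kw n) := by
  rcases h : kws.any (fun kw => PySem.Str.isIn kw n) with _ | _
  · rw [← Bool.not_eq_true, pvHits_iff kws hne]
    rintro ⟨kw, hmem, hinf⟩
    rw [List.any_eq_false] at h
    exact (h kw hmem) ((PySem.Str.isIn_iff_infix _ _).mpr hinf)
  · rw [pvHits_iff kws hne]
    rw [List.any_eq_true] at h
    obtain ⟨kw, hmem, hin⟩ := h
    exact ⟨kw, hmem, (PySem.Str.isIn_iff_infix _ _).mp hin⟩

-- every hard keyword is in the full keyword list, so a hard match implies a full match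
theorem hard_any_imp_kw_any (n : String)
    (h : pvNonClinicalHard.any (fun kw => PySem.Str.isIn kw n) = true) :
    pvNonClinicalKeywords.any (fun kw => PySem.Str.isIn kw n) = true := by
  rw [List.any_eq_true] at h ⊢
  obtain ⟨kw, hmem, hp⟩ := h
  refine ⟨kw, ?_, hp⟩
  simp only [pvNonClinicalHard, List.mem_cons, List.not_mem_nil, or_false] at hmem
  rcases hmem with rfl | rfl | rfl | rfl | rfl <;> simp [pvNonClinicalKeywords]

-- ===== VERDICT (by name: the statement is the Claim_ definition above) =====
theorem is_non_clinical_name_py_spec : Claim_equal_is_non_clinical_name_py := by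
  intro name _
  unfold Spec_is_non_clinical_name_py is_non_clinical_name_py is_non_clinical_name_py_alt
  by_cases he : name.toList.isEmpty
  · simp only [he, if_true]
  · simp only [he, Bool.false_eq_true, if_false]
    rw [pvSweep_eq,
      pvHits_eq_any_isIn pvDentalKeywords (by decide) (PySem.Str.upper name),
      pvHits_eq_any_isIn pvNonClinicalKeywords (by decide) (PySem.Str.upper name)]
    cases hd : pvDentalKeywords.any (fun dk => PySem.Str.isIn dk (PySem.Str.upper name)) with
    | true => simp
    | false =>
      simp only [Bool.not_false, Bool.and_true, Bool.true_and, Bool.false_or]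
      cases hh : pvNonClinicalHard.any (fun kw => PySem.Str.isIn kw (PySem.Str.upper name)) with
      | true =>
        exact (if_pos rfl).trans (hard_any_imp_kw_any _ hh).symm
      | false =>
        simp only [Bool.false_eq_true, if_false]
        cases hk : pvNonClinicalKeywords.any (fun kw => PySem.Str.isIn kw (PySem.Str.upper name)) with
        | true => simp
        | false => simp only [Bool.false_eq_true, if_false]
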